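-- pv_equiv track=rewrite | github.com/Nghia03092004/nghia03092004.github.io | project_euler_unified/problem_906/solution.py | fib_sum_iterative
-- ===== SOURCE A (Python) =====
-- def fib_sum_iterative(n, mod):
--     """Compute sum F(1..n) mod p by iterating."""
--     if n <= 0:
--         return 0
--     total = 0
--     a, b = 1, 1  # F(1), F(2)
--     for k in range(1, n + 1):
--         total = (total + a) % mod
--         a, b = b, (a + b) % mod
--     return total
-- ===== SOURCE B (Python) =====
-- def _bits(m):
--     # bits of m, most significant first
--     bits = []
--     while m:
--         bits.append(m & 1)
--         m >>= 1
--     return bits[::-1]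
--
--
-- def fib_sum_iterative(n, mod):
--     """Compute sum F(1..n) mod p via fast doubling: sum = F(n+2) - 1."""
--     if n <= 0:
--         return 0
--     a, b = 0, 1  # F(0), F(1)
--     for bit in _bits(n + 2):
--         c = (a * ((2 * b - a) % mod)) % mod
--         d = (a * a + b * b) % mod
--         if bit:
--             a, b = d, (c + d) % mod
--         else:
--             a, b = c, d
--     return (a - 1) % mod
-- ===== Notes on version B (the rewrite author's own statement) =====
-- stated objective: faster
-- what changed: Replaced the O(n) loop summing Fibonacci numbers with O(log n) fast doubling computing F(n+2) mod p and using sum F(1..n) = F(n+2) - 1.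
import Mathlib
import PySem

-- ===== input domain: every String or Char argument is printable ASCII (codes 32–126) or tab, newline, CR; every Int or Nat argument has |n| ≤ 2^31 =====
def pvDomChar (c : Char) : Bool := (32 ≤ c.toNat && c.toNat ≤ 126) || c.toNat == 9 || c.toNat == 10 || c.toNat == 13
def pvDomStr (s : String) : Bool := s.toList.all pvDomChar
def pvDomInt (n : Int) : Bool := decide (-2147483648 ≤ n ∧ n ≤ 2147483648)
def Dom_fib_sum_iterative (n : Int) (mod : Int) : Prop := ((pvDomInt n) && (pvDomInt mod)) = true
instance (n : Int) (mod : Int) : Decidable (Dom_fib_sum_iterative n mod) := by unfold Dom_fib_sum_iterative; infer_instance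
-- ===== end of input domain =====

-- B replaces A's O(n) summation loop by O(log n) fast doubling (sum F(1..n) = F(n+2) - 1 mod p).

-- ===== PORT A =====
-- one loop step of A: total = (total + a) % mod; a, b = b, (a + b) % mod   (loop variable unused)
def pvAStep (mod : Int) (st : Int × Int × Int) : Int × Int × Int :=
  (PySem.Int.mod (st.1 + st.2.1) mod, st.2.2, PySem.Int.mod (st.2.1 + st.2.2) mod)

def fib_sum_iterative (n : Int) (mod : Int) : Int :=
  if n ≤ 0 then 0
  else
    ((PySem.List.pyRange 1 (n + 1) 1).foldl (fun st _ => pvAStep mod st) (0, 1, 1)).1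

-- ===== PORT B =====
-- Source B's _bits(m): collects bits LSB-first, then reverses; here: LSB-first list, reversed at use site
def pvBitsLSB (m : Nat) : List Bool :=
  if m = 0 then [] else (m % 2 == 1) :: pvBitsLSB (m / 2)

-- one fast-doubling step of Source B's loop body
def pvBStep (mod : Int) (st : Int × Int) (bit : Bool) : Int × Int :=
  let c := PySem.Int.mod (st.1 * (PySem.Int.mod (2 * st.2 - st.1) mod)) mod
  let d := PySem.Int.mod (st.1 * st.1 + st.2 * st.2) mod
  if bit then (d, PySem.Int.mod (c + d) mod) else (c, d)

def fib_sum_iterative_alt (n : Int) (mod : Int) : Int :=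
  if n ≤ 0 then 0
  else
    let st := ((pvBitsLSB (n + 2).toNat).reverse).foldl (pvBStep mod) (0, 1)
    PySem.Int.mod (st.1 - 1) mod

-- ===== PRECONDITION & SPEC =====
-- Pre_ excludes mod = 0 with n ≥ 1, where Python's '%' raises ZeroDivisionError (in both A and B).
def Pre_fib_sum_iterative (n : Int) (mod : Int) : Prop := n ≤ 0 ∨ mod ≠ 0
instance (n : Int) (mod : Int) : Decidable (Pre_fib_sum_iterative n mod) := by
  unfold Pre_fib_sum_iterative; infer_instance

def pvWitness_fib_sum_iterative : Int × Int := (10, 7)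

def Spec_fib_sum_iterative (n : Int) (mod : Int) (out : Int) : Prop := out = fib_sum_iterative_alt n mod
instance (n : Int) (mod : Int) (out : Int) : Decidable (Spec_fib_sum_iterative n mod out) := by
  unfold Spec_fib_sum_iterative; infer_instance

-- ===== CLAIM (what is proved, stated in full; the proofs are below) =====
def Claim_equal_fib_sum_iterative : Prop := ∀ (n : Int) (mod : Int), Dom_fib_sum_iterative n mod → Pre_fib_sum_iterative n mod → Spec_fib_sum_iterative n mod (fib_sum_iterative n mod)

-- ===== LEMMAS AND PROOFS =====

-- (F k : Int), the mathematical Fibonacci numbers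
def pvF (k : Nat) : Int := (Nat.fib k : Int)

theorem pvF_add_two (k : Nat) : pvF (k + 2) = pvF k + pvF (k + 1) := by
  simp [pvF, Nat.fib_add_two]

-- Python % (= Int.fmod) maps congruent values to the same representative
theorem pv_mod_congr {m x y : Int} (h : x ≡ y [ZMOD m]) :
    PySem.Int.mod x m = PySem.Int.mod y m := by
  obtain ⟨k, hk⟩ := h.dvd
  have : y = x + m * k := by omega
  simp [PySem.Int.mod, this, Int.add_mul_fmod_self_left]

theorem pv_mod_modEq (x m : Int) : PySem.Int.mod x m ≡ x [ZMOD m] := by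
  have h2 : PySem.Int.mod x m - x = m * (-(x.fdiv m)) := by
    simp only [PySem.Int.mod]
    linear_combination Int.mul_fdiv_add_fmod x m
  exact (Int.modEq_iff_dvd.mpr ⟨-(x.fdiv m), h2⟩).symm

theorem pvF4 (k : Nat) : pvF (k + 4) = pvF (k + 2) + pvF (k + 3) := by
  have h := pvF_add_two (k + 2)
  have e1 : k + 2 + 2 = k + 4 := by omega
  have e2 : k + 2 + 1 = k + 3 := by omega
  rw [e1, e2] at h
  exact h

-- a fold whose body ignores the list elements is function iteration
theorem pv_foldl_const {α β : Type} (g : α → α) (l : List β) (init : α) :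
    l.foldl (fun st _ => g st) init = g^[l.length] init := by
  induction l generalizing init with
  | nil => rfl
  | cons b t ih => simp [List.foldl_cons, ih, Function.iterate_succ_apply]

-- A-side invariant: after k+1 iterations, total is the canonical residue of F(k+3)-1,
-- and a, b are congruent to F(k+2), F(k+3)
theorem pvA_invariant (mod : Int) (k : Nat) :
    ((pvAStep mod)^[k + 1] (0, 1, 1)).1 = PySem.Int.mod (pvF (k + 3) - 1) mod ∧
    ((pvAStep mod)^[k + 1] (0, 1, 1)).2.1 ≡ pvF (k + 2) [ZMOD mod] ∧
    ((pvAStep mod)^[k + 1] (0, 1, 1)).2.2 ≡ pvF (k + 3) [ZMOD mod] := by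
  induction k with
  | zero =>
    refine ⟨?_, ?_, ?_⟩
    · show PySem.Int.mod (0 + 1) mod = _
      norm_num [pvF]
    · show (1 : Int) ≡ pvF 2 [ZMOD mod]
      norm_num [pvF]
    · show PySem.Int.mod (1 + 1) mod ≡ pvF 3 [ZMOD mod]
      have := pv_mod_modEq (1 + 1 : Int) mod
      norm_num [pvF] at this ⊢; exact this
  | succ k ih =>
    obtain ⟨h1, h2, h3⟩ := ih
    rw [Function.iterate_succ_apply']
    set st := (pvAStep mod)^[k + 1] (0, 1, 1) with hst
    refine ⟨?_, ?_, ?_⟩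
    · show PySem.Int.mod (st.1 + st.2.1) mod = PySem.Int.mod (pvF (k + 1 + 3) - 1) mod
      apply pv_mod_congr
      have e1 : st.1 ≡ pvF (k + 3) - 1 [ZMOD mod] := h1 ▸ (pv_mod_modEq _ _).trans (Int.ModEq.refl _)
      have := e1.add h2
      calc st.1 + st.2.1 ≡ (pvF (k + 3) - 1) + pvF (k + 2) [ZMOD mod] := this
        _ = pvF (k + 1 + 3) - 1 := by rw [show k + 1 + 3 = k + 4 from by omega, pvF4]; ring
    · show st.2.2 ≡ pvF (k + 1 + 2) [ZMOD mod]
      exact h3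
    · show PySem.Int.mod (st.2.1 + st.2.2) mod ≡ pvF (k + 1 + 3) [ZMOD mod]
      refine (pv_mod_modEq _ _).trans ?_
      calc st.2.1 + st.2.2 ≡ pvF (k + 2) + pvF (k + 3) [ZMOD mod] := h2.add h3
        _ = pvF (k + 1 + 3) := by rw [show k + 1 + 3 = k + 4 from by omega, pvF4]

-- Fibonacci doubling identities over Int
theorem pvF_two_mul (h : Nat) : pvF (2 * h) = pvF h * (2 * pvF (h + 1) - pvF h) := by
  have hle : Nat.fib h ≤ 2 * Nat.fib (h + 1) :=
    le_trans Nat.fib_le_fib_succ (by omega)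
  have := Nat.fib_two_mul h
  simp only [pvF]
  rw [this]
  push_cast [Nat.cast_sub hle]
  ring

theorem pvF_two_mul_add_one (h : Nat) : pvF (2 * h + 1) = pvF h * pvF h + pvF (h + 1) * pvF (h + 1) := by
  have := Nat.fib_two_mul_add_one h
  simp only [pvF]
  rw [this]
  push_cast
  ring

-- B-side invariant: folding the MSB-first bits of m starting from (F 0, F 1)
-- yields a pair congruent to (F m, F (m+1))
theorem pvB_invariant (mod : Int) (m : Nat) :
    (((pvBitsLSB m).reverse).foldl (pvBStep mod) (0, 1)).1 ≡ pvF m [ZMOD mod] ∧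
    (((pvBitsLSB m).reverse).foldl (pvBStep mod) (0, 1)).2 ≡ pvF (m + 1) [ZMOD mod] := by
  induction m using Nat.strong_induction_on with
  | _ m ih =>
    by_cases hm : m = 0
    · subst hm
      rw [pvBitsLSB]
      simp [pvF]
    · rw [pvBitsLSB, if_neg hm]
      have hlt : m / 2 < m := Nat.div_lt_self (Nat.pos_of_ne_zero hm) (by norm_num)
      obtain ⟨h1, h2⟩ := ih (m / 2) hlt
      rw [List.reverse_cons, List.foldl_append, List.foldl_cons, List.foldl_nil]
      set st := ((pvBitsLSB (m / 2)).reverse).foldl (pvBStep mod) (0, 1) with hst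
      have hc : PySem.Int.mod (st.1 * (PySem.Int.mod (2 * st.2 - st.1) mod)) mod ≡ pvF (2 * (m / 2)) [ZMOD mod] := by
        refine (pv_mod_modEq _ _).trans ?_
        have hin : st.1 * (PySem.Int.mod (2 * st.2 - st.1) mod) ≡ st.1 * (2 * st.2 - st.1) [ZMOD mod] :=
          (Int.ModEq.refl st.1).mul (pv_mod_modEq _ _)
        refine hin.trans ?_
        rw [pvF_two_mul]
        exact h1.mul (((Int.ModEq.refl 2).mul h2).sub h1)
      have hd : PySem.Int.mod (st.1 * st.1 + st.2 * st.2) mod ≡ pvF (2 * (m / 2) + 1) [ZMOD mod] := by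
        refine (pv_mod_modEq _ _).trans ?_
        rw [pvF_two_mul_add_one]
        exact (h1.mul h1).add (h2.mul h2)
      by_cases hb : m % 2 = 1
      · have hm2 : m = 2 * (m / 2) + 1 := by omega
        simp only [pvBStep, hb, beq_self_eq_true, if_true]
        refine ⟨?_, ?_⟩
        · show PySem.Int.mod (st.1 * st.1 + st.2 * st.2) mod ≡ pvF m [ZMOD mod]
          rw [hm2]; exact hd
        · show PySem.Int.mod (_ + _) mod ≡ pvF (m + 1) [ZMOD mod]
          rw [show m + 1 = 2 * (m / 2) + 2 from by omega, pvF_add_two]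
          exact (pv_mod_modEq _ _).trans (hc.add hd)
      · have hm2 : m = 2 * (m / 2) := by omega
        have hb' : (m % 2 == 1) = false := by simp [hb]
        simp only [pvBStep, hb']
        refine ⟨?_, ?_⟩
        · show PySem.Int.mod (st.1 * (PySem.Int.mod (2 * st.2 - st.1) mod)) mod ≡ pvF m [ZMOD mod]
          rw [hm2]; exact hc
        · show PySem.Int.mod (st.1 * st.1 + st.2 * st.2) mod ≡ pvF (m + 1) [ZMOD mod]
          rw [show m + 1 = 2 * (m / 2) + 1 from by omega]; exact hd

-- closed form of each port on positive n
theorem pvA_closed (n mod : Int) (hn : ¬ n ≤ 0) :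
    fib_sum_iterative n mod = PySem.Int.mod (pvF (n.toNat + 2) - 1) mod := by
  have hlen : (PySem.List.pyRange 1 (n + 1) 1).length = n.toNat := by
    rw [PySem.List.length_pyRange_one]; omega
  have hk : ∃ k : Nat, n.toNat = k + 1 := ⟨n.toNat - 1, by omega⟩
  obtain ⟨k, hkeq⟩ := hk
  rw [fib_sum_iterative, if_neg hn, pv_foldl_const, hlen, hkeq]
  have := (pvA_invariant mod k).1
  rw [this]

theorem pvB_closed (n mod : Int) (hn : ¬ n ≤ 0) :
    fib_sum_iterative_alt n mod = PySem.Int.mod (pvF (n.toNat + 2) - 1) mod := by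
  rw [fib_sum_iterative_alt, if_neg hn]
  have hm : (n + 2).toNat = n.toNat + 2 := by omega
  have h := (pvB_invariant mod ((n + 2).toNat)).1
  exact pv_mod_congr ((h.sub (Int.ModEq.refl 1)).trans (by rw [hm]))

-- ===== VERDICT (by name: the statement is the Claim_ definition above) =====
theorem fib_sum_iterative_spec : Claim_equal_fib_sum_iterative := by
  intro n mod _ _
  unfold Spec_fib_sum_iterative
  by_cases hn : n ≤ 0
  · simp [fib_sum_iterative, fib_sum_iterative_alt, hn]
  · rw [pvA_closed n mod hn, pvB_closed n mod hn]
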